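-- pv_equiv track=rewrite | github.com/chaitanya985/geeks-for-geeks-solved-problems | Difficulty: Easy/Number and the Digit Sum/number-and-the-digit-sum.py | numberCount
-- ===== SOURCE A (Python) =====
-- def numberCount(n,k):
-- # code here
--
--     def sum_of_digits(num):
--
--         total=0
--
--         while num > 0:
--
--             total += num % 10
--
--             num=num // 10
--
--         return total
--
--     l,r=1, n
--
--     while l <= r:
--
--         mid=(l+r)//2
--
--         if (mid - sum_of_digits(mid) >= k):
--
--             r=mid-1
--
--         else:
--             l=mid+1
--
--     return n-l+1
-- ===== SOURCE B (Python) =====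
-- def numberCount(n, k):
--     # Exploit monotonicity of x - digitsum(x): find the smallest x with
--     # x - digitsum(x) >= k by scanning a short window starting at max(k, 1)
--     # (the digit sum is tiny compared to x), then count by arithmetic.
--     def digit_sum(num):
--         total = 0
--         while num > 0:
--             total += num % 10
--             num = num // 10
--         return total
--     x = max(k, 1)
--     while x - digit_sum(x) < k:
--         x += 1
--     return max(0, n - x + 1)
-- ===== Notes on version B (the rewrite author's own statement) =====
-- stated objective: alternative
-- what changed: Replaces the binary search over [1,n] with a direct computation of the smallest x satisfying x - digitsum(x) >= k, found by a short forward scan starting at max(k,1) (digit sums are tiny compared to x), and then counts by arithmetic: max(0, n - x + 1).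
-- intended difference: For n < 0 the binary search never runs and A returns n itself, a negative 'count'; B returns 0, the intended count of an empty range. — e.g. on numberCount(-1, 0): A returns -1, B returns 0
import Mathlib
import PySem

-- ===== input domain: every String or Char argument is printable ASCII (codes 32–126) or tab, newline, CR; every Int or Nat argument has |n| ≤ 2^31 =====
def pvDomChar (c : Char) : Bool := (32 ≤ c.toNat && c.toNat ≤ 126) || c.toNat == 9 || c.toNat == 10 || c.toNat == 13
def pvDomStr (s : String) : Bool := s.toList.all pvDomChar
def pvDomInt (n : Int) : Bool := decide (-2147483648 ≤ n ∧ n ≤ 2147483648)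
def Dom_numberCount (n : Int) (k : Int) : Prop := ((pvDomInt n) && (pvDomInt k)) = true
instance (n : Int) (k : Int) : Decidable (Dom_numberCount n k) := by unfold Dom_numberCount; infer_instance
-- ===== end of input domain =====

-- B replaces A's binary search by directly computing the smallest x with x - digitsum(x) >= k
-- (a short forward scan from max(k,1)) and counting arithmetically; for n < 0 A returns n itself, B returns 0 (see D_).


-- ===== PORT A =====
-- the nested helper sum_of_digits (identical in A and in Source B): while num > 0: total += num % 10; num //= 10
def sdLoop : Nat → Int → Int → Int
  | 0, _, total => total
  | f+1, num, total =>
      if 0 < num then sdLoop f (PySem.Int.floordiv num 10) (total + PySem.Int.mod num 10)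
      else total

def sumDigits (num : Int) : Int := sdLoop num.toNat num 0
-- fuel num.toNat only totalizes the while loop (num shrinks by a factor 10 each pass, so by at least 1)

-- A's while l <= r binary-search loop; fuel r+1-l (the interval shrinks by at least 1 per pass) only totalizes it
def bsLoop (k : Int) : Nat → Int → Int → Int
  | 0, l, _ => l
  | f+1, l, r =>
      if l ≤ r then
        let mid := PySem.Int.floordiv (l + r) 2
        if k ≤ mid - sumDigits mid then bsLoop k f l (mid - 1)
        else bsLoop k f (mid + 1) r
      else l

def numberCount (n : Int) (k : Int) : Int := n - bsLoop k (n.toNat + 1) 1 n + 1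

-- ===== PORT B =====
-- Source B's  x = max(k, 1); while x - digit_sum(x) < k: x += 1 .  Fuel 400 only totalizes the while loop:
-- on the stated domain it stops within 91 passes (digit sums of numbers below 10^10 are at most 90).
def altLoop (k : Int) : Nat → Int → Int
  | 0, x => x
  | f+1, x => if x - sumDigits x < k then altLoop k f (x + 1) else x

def numberCount_alt (n : Int) (k : Int) : Int := max 0 (n - altLoop k 400 (max k 1) + 1)

-- ===== PRECONDITION & SPEC =====
-- For n < 0 A's search loop never runs and A returns n itself, a negative "count" of [1,n]; B returns 0, the intended count of an empty range.
def D_numberCount (n : Int) (k : Int) : Prop := n < 0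
instance (n : Int) (k : Int) : Decidable (D_numberCount n k) := by unfold D_numberCount; infer_instance

def Spec_numberCount (n : Int) (k : Int) (out : Int) : Prop := ¬ D_numberCount n k → out = numberCount_alt n k
instance (n : Int) (k : Int) (out : Int) : Decidable (Spec_numberCount n k out) := by unfold Spec_numberCount; infer_instance

def pvDiffWitness_numberCount : Int × Int := (-1, 0)
def pvDiffWitnessOut_numberCount : Int × Int := (-1, 0)

-- ===== CLAIM (what is proved, stated in full; the proofs are below) =====
def Claim_unchanged_numberCount : Prop := ∀ (n : Int) (k : Int), Dom_numberCount n k → Spec_numberCount n k (numberCount n k)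
def Claim_changed_numberCount : Prop := Dom_numberCount (pvDiffWitness_numberCount.1) (pvDiffWitness_numberCount.2) ∧ D_numberCount (pvDiffWitness_numberCount.1) (pvDiffWitness_numberCount.2) ∧ numberCount (pvDiffWitness_numberCount.1) (pvDiffWitness_numberCount.2) = pvDiffWitnessOut_numberCount.1 ∧ numberCount_alt (pvDiffWitness_numberCount.1) (pvDiffWitness_numberCount.2) = pvDiffWitnessOut_numberCount.2 ∧ pvDiffWitnessOut_numberCount.1 ≠ pvDiffWitnessOut_numberCount.2
def Claim_exact_numberCount : Prop := ∀ (n : Int) (k : Int), Dom_numberCount n k → D_numberCount n k → numberCount n k ≠ numberCount_alt n k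

-- ===== LEMMAS AND PROOFS =====

theorem sdLoop_nonpos (f : Nat) (num total : Int) (h : num ≤ 0) : sdLoop f num total = total := by
  cases f <;> simp [sdLoop] <;> omega

theorem sdLoop_congr : ∀ (f g : Nat) (num total : Int), num.toNat ≤ f → num.toNat ≤ g →
    sdLoop f num total = sdLoop g num total := by
  intro f
  induction f with
  | zero =>
    intro g num total hf _
    rw [sdLoop_nonpos 0 num total (by omega), sdLoop_nonpos g num total (by omega)]
  | succ f ih =>
    intro g num total hf hg
    by_cases hp : 0 < num
    · cases g with
      | zero => omega
      | succ g =>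
        have h10 : PySem.Int.floordiv num 10 = num / 10 :=
          PySem.Int.floordiv_eq_ediv_of_pos (by norm_num)
        simp only [sdLoop, if_pos hp]
        apply ih
        · rw [h10]; omega
        · rw [h10]; omega
    · rw [sdLoop_nonpos _ _ _ (by omega), sdLoop_nonpos _ _ _ (by omega)]

theorem sdLoop_acc : ∀ (f : Nat) (num total : Int), sdLoop f num total = total + sdLoop f num 0 := by
  intro f
  induction f with
  | zero => intro num total; simp [sdLoop]
  | succ f ih =>
    intro num total
    by_cases hp : 0 < num
    · simp only [sdLoop, if_pos hp]
      rw [ih _ (total + PySem.Int.mod num 10), ih _ (0 + PySem.Int.mod num 10)]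
      ring
    · simp [sdLoop, if_neg hp]

theorem ds_nonpos (num : Int) (h : num ≤ 0) : sumDigits num = 0 :=
  sdLoop_nonpos _ _ _ h

theorem ds_pos (num : Int) (h : 0 < num) : sumDigits num = num % 10 + sumDigits (num / 10) := by
  have h10 : PySem.Int.floordiv num 10 = num / 10 :=
    PySem.Int.floordiv_eq_ediv_of_pos (by norm_num)
  have hmd : PySem.Int.mod num 10 = num % 10 :=
    PySem.Int.mod_eq_emod_of_pos (by norm_num)
  obtain ⟨m, hm⟩ : ∃ m, num.toNat = m + 1 := ⟨num.toNat - 1, by omega⟩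
  unfold sumDigits
  rw [hm]
  simp only [sdLoop, if_pos h]
  rw [sdLoop_acc, h10, hmd, sdLoop_congr m (num / 10).toNat (num / 10) 0 (by omega) le_rfl]
  ring

theorem ds_nonneg (num : Int) : 0 ≤ sumDigits num := by
  have aux : ∀ (m : Nat) (x : Int), x.toNat ≤ m → 0 ≤ sumDigits x := by
    intro m
    induction m with
    | zero => intro x hx; rw [ds_nonpos x (by omega)]
    | succ m ih =>
      intro x hx
      by_cases hp : 0 < x
      · rw [ds_pos x hp]
        have h1 := ih (x / 10) (by omega)
        have h2 : 0 ≤ x % 10 := by omega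
        linarith
      · rw [ds_nonpos x (by omega)]
  exact aux num.toNat num le_rfl

theorem ds_succ (num : Int) : sumDigits (num + 1) ≤ sumDigits num + 1 := by
  have aux : ∀ (m : Nat) (x : Int), x.toNat ≤ m → sumDigits (x + 1) ≤ sumDigits x + 1 := by
    intro m
    induction m with
    | zero =>
      intro x hx
      by_cases hneg : x + 1 ≤ 0
      · rw [ds_nonpos (x + 1) hneg]; linarith [ds_nonneg x]
      · have hx0 : x = 0 := by omega
        subst hx0
        have h1 : sumDigits 1 = 1 := by
          rw [ds_pos 1 (by norm_num)]
          norm_num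
          exact ds_nonpos 0 le_rfl
        simp [zero_add, h1, ds_nonpos 0 le_rfl]
    | succ m ih =>
      intro x hx
      by_cases hneg : x + 1 ≤ 0
      · rw [ds_nonpos (x + 1) hneg]; linarith [ds_nonneg x]
      · by_cases hx0 : x = 0
        · subst hx0
          have h1 : sumDigits 1 = 1 := by
            rw [ds_pos 1 (by norm_num)]
            norm_num
            exact ds_nonpos 0 le_rfl
          simp [zero_add, h1, ds_nonpos 0 le_rfl]
        · have hxp : 0 < x := by omega
          by_cases h9 : x % 10 = 9
          · have hq1 : (x + 1) % 10 = 0 := by omega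
            have hq2 : (x + 1) / 10 = x / 10 + 1 := by omega
            rw [ds_pos (x + 1) (by omega), hq1, hq2, ds_pos x hxp, h9]
            have hih := ih (x / 10) (by omega)
            linarith [ds_nonneg (x / 10)]
          · have hq1 : (x + 1) % 10 = x % 10 + 1 := by omega
            have hq2 : (x + 1) / 10 = x / 10 := by omega
            rw [ds_pos (x + 1) (by omega), hq1, hq2, ds_pos x hxp]
            linarith
  exact aux num.toNat num le_rfl

theorem f_mono (x y : Int) (h : x ≤ y) : x - sumDigits x ≤ y - sumDigits y := by
  have aux : ∀ (d : Nat) (z : Int), z - sumDigits z ≤ (z + d) - sumDigits (z + d) := by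
    intro d
    induction d with
    | zero => intro z; simp
    | succ d ih =>
      intro z
      have h1 := ih z
      have h2 := ds_succ (z + d)
      push_cast
      rw [show z + ((d : Int) + 1) = z + (d : Int) + 1 from by ring]
      linarith
  obtain ⟨d, hd⟩ : ∃ d : Nat, y = x + d := ⟨(y - x).toNat, by omega⟩
  subst hd
  exact aux d x

theorem ds_pow (d : Nat) : ∀ x : Int, 0 ≤ x → x < 10 ^ d → sumDigits x ≤ 9 * (d : Int) := by
  induction d with
  | zero =>
    intro x h0 h1
    have hx : x = 0 := by simp at h1; omega
    subst hx
    rw [ds_nonpos 0 le_rfl]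
    simp
  | succ d ih =>
    intro x h0 h1
    by_cases hx : x = 0
    · subst hx; rw [ds_nonpos 0 le_rfl]; positivity
    · have hxp : 0 < x := by omega
      rw [ds_pos x hxp]
      have hP : (0:Int) < 10 ^ d := by positivity
      have hlt : x < 10 ^ d * 10 := by rw [← pow_succ]; exact h1
      have hdiv : x / 10 < 10 ^ d := by
        generalize hq : (10:Int) ^ d = P at hP hlt
        omega
      have hih := ih (x / 10) (by omega) hdiv
      have hm : x % 10 ≤ 9 := by omega
      push_cast
      linarith

theorem alt_spec (k : Int) : ∀ (f : Nat) (x : Int),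
    (∃ j : Nat, j < f ∧ ¬((x + (j : Int)) - sumDigits (x + (j : Int)) < k)) →
    x ≤ altLoop k f x ∧ ¬(altLoop k f x - sumDigits (altLoop k f x) < k) ∧
      ∀ z, x ≤ z → z < altLoop k f x → z - sumDigits z < k := by
  intro f
  induction f with
  | zero => rintro x ⟨j, hj, _⟩; omega
  | succ f ih =>
    rintro x ⟨j, hj, hP⟩
    by_cases hc : x - sumDigits x < k
    · have hj0 : j ≠ 0 := by
        rintro rfl
        simp only [Nat.cast_zero, add_zero] at hP
        exact hP hc
      obtain ⟨j', rfl⟩ : ∃ j', j = j' + 1 := ⟨j - 1, by omega⟩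
      have hP' : ¬((x + 1 + (j' : Int)) - sumDigits (x + 1 + (j' : Int)) < k) := by
        have he : x + 1 + (j' : Int) = x + ((j' + 1 : Nat) : Int) := by push_cast; ring
        rw [he]; exact hP
      obtain ⟨h1, h2, h3⟩ := ih (x + 1) ⟨j', by omega, hP'⟩
      simp only [altLoop, if_pos hc]
      refine ⟨by omega, h2, ?_⟩
      intro z hz1 hz2
      rcases eq_or_lt_of_le hz1 with rfl | hgt
      · exact hc
      · exact h3 z (by omega) hz2
    · simp only [altLoop, if_neg hc]
      exact ⟨le_rfl, hc, by intro z h1 h2; omega⟩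

theorem bs_eq (k L : Int) (hL1 : 1 ≤ L) (hLP : ¬(L - sumDigits L < k))
    (hmin : ∀ z, 1 ≤ z → z < L → z - sumDigits z < k) :
    ∀ (f : Nat) (l r : Int), 1 ≤ l → (r + 1 - l).toNat < f →
    bsLoop k f l r = max l (min L (r + 1)) := by
  intro f
  induction f with
  | zero => intro l r _ h; omega
  | succ f ih =>
    intro l r hl hf
    by_cases hlr : l ≤ r
    · obtain ⟨hm1, hm2⟩ := PySem.Int.floordiv_two_mid_bounds hlr
      simp only [bsLoop, if_pos hlr]
      set mid := PySem.Int.floordiv (l + r) 2 with hmid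
      by_cases hc : k ≤ mid - sumDigits mid
      · rw [if_pos hc]
        have hLmid : L ≤ mid := by
          by_contra hno
          have := hmin mid (by omega) (by omega)
          linarith
        rw [ih l (mid - 1) hl (by omega)]
        omega
      · rw [if_neg hc]
        have hmidL : mid < L := by
          by_contra hno
          have := f_mono L mid (by omega)
          have hk : k ≤ L - sumDigits L := by omega
          linarith
        rw [ih (mid + 1) r (by omega) (by omega)]
        omega
    · simp only [bsLoop, if_neg hlr]
      omega

-- ===== VERDICT (by name: the statement is the Claim_ definition above) =====
theorem numberCount_spec : Claim_unchanged_numberCount := by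
  intro n k hdom hnd
  have hn0 : 0 ≤ n := by unfold D_numberCount at hnd; omega
  have hk : k ≤ 2147483648 := by
    simp only [Dom_numberCount, pvDomInt, Bool.and_eq_true, decide_eq_true_eq] at hdom
    exact hdom.2.2
  set m : Int := max k 1 with hm
  have hm1 : 1 ≤ m := le_max_right k 1
  have hmk : k ≤ m := le_max_left k 1
  have hex : ∃ j : Nat, j < 400 ∧ ¬((m + (j : Int)) - sumDigits (m + (j : Int)) < k) := by
    refine ⟨90, by norm_num, ?_⟩
    have hds : sumDigits (m + (90:Nat)) ≤ 9 * ((10:Nat) : Int) :=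
      ds_pow 10 (m + (90:Nat)) (by push_cast; omega) (by push_cast; omega)
    push_cast at hds ⊢
    omega
  obtain ⟨hxL, hPL, hminm⟩ := alt_spec k 400 m hex
  set L : Int := altLoop k 400 m with hL
  have hL1 : 1 ≤ L := le_trans hm1 hxL
  have hmin : ∀ z, 1 ≤ z → z < L → z - sumDigits z < k := by
    intro z hz1 hz2
    by_cases hzm : m ≤ z
    · exact hminm z hzm hz2
    · have hzk : z < k := by omega
      have := ds_nonneg z
      linarith
  unfold numberCount numberCount_alt
  rw [bs_eq k L hL1 hPL hmin (n.toNat + 1) 1 n le_rfl (by omega), ← hm, ← hL]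
  omega

theorem numberCount_changed : Claim_changed_numberCount := by
  unfold Claim_changed_numberCount; decide

theorem numberCount_tight : Claim_exact_numberCount := by
  intro n k _ hd
  unfold D_numberCount at hd
  unfold numberCount numberCount_alt
  have h1 : n.toNat = 0 := by omega
  rw [h1]
  have h2 : ¬ (1:Int) ≤ n := by omega
  simp only [bsLoop, if_neg h2]
  have := le_max_left (0:Int) (n - altLoop k 400 (max k 1) + 1)
  omega
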